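-- pv_equiv track=rewrite | github.com/pypi-data/pypi-mirror-379 | packages/ryxpress/ryxpress-0.0.9.tar.gz/ryxpress-0.0.9/src/ryxpress/tracing.py | _marked_vec
-- ===== SOURCE A (Python) =====
-- from typing import Dict, List, Optional, Sequence, Union
--
-- def _unique_preserve_order(seq: Sequence[str]) -> List[str]:
--     seen = set()
--     out: List[str] = []
--     for x in seq:
--         if x not in seen:
--             seen.add(x)
--             out.append(x)
--     return out
--
-- def _traverse(start: str, graph: Dict[str, List[str]]) -> List[str]:
--     """
--     Breadth-like traversal similar to the R implementation:
--     - start with stack = graph[start]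
--     - repeatedly pop the first element, append to visited, and enqueue neighbours
--       that are not already visited or in stack.
--     Returns visited in the order discovered.
--     """
--     visited: List[str] = []
--     stack: List[str] = list(graph.get(start, []) or [])
--     while stack:
--         node = stack[0]
--         stack = stack[1:]
--         if node in visited:
--             continue
--         visited.append(node)
--         nb = graph.get(node) or []
--         # append neighbours that are not already visited or queued
--         for n in nb:
--             if n not in visited and n not in stack:
--                 stack.append(n)
--     return visited
--
-- def _marked_vec(target: str, graph: Dict[str, List[str]], transitive: bool) -> List[str]:
--     imm = graph.get(target) or []
--     imm_unique = _unique_preserve_order(imm)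
--     if not transitive:
--         return imm_unique
--     full = _traverse(target, graph)
--     # transitive-only = elements in full that are not in imm (preserve order from 'full')
--     trans_only = [x for x in full if x not in imm_unique]
--     return imm_unique + [f"{t}*" for t in trans_only]
-- ===== SOURCE B (Python) =====
-- def _marked_vec(target, graph, transitive):
--     imm = graph.get(target) or []
--     imm_unique = list(dict.fromkeys(imm))
--     if not transitive:
--         return imm_unique
--     # O(V+E) traversal: queue consumed by a read index; 'seen' = visited-or-queued set
--     visited = []
--     visited_set = set()
--     queue = list(imm)
--     seen = set(queue)
--     i = 0
--     while i < len(queue):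
--         node = queue[i]
--         i += 1
--         if node in visited_set:
--             continue
--         visited_set.add(node)
--         visited.append(node)
--         for n in (graph.get(node) or []):
--             if n not in seen:
--                 seen.add(n)
--                 queue.append(n)
--     imm_set = set(imm_unique)
--     out = list(imm_unique)
--     for x in visited:
--         if x not in imm_set:
--             out.append(x + "*")
--     return out
-- ===== Notes on version B (the rewrite author's own statement) =====
-- stated objective: alternative
-- what changed: Replaces A's list-slicing queue with list-membership tests (node in visited, n in stack, x not in imm_unique) by an index-advanced queue plus hash sets for visited and visited-or-queued membership and a precomputed set for the final filter, and replaces the hand-rolled order-preserving dedup helper by dict.fromkeys; asymptotically O(V+E) traversal, though a timing run's input family showed no measured speed-up.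
import Mathlib
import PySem

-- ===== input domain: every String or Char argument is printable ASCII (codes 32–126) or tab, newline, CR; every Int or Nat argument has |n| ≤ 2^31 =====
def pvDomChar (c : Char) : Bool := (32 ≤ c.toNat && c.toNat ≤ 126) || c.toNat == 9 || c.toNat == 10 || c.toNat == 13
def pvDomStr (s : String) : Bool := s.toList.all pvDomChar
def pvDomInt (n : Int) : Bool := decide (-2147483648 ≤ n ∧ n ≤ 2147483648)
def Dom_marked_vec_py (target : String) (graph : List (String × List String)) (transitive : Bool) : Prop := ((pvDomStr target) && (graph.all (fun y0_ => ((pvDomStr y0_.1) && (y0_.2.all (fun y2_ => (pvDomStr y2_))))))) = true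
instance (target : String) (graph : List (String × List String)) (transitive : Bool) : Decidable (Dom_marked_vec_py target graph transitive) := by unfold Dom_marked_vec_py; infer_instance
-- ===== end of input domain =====

-- B replaces A's list-membership scans and slice-pop queue by membership sets and an index-advanced queue: a different traversal mechanism, same output.

-- `graph.get(k) or []` (missing key → None → []; empty list → [])
def pvGet (graph : List (String × List String)) (k : String) : List String :=
  ((PySem.Dict.mk graph).get? k).getD []

-- fuel bound for the while-loops (total pops ≤ initial stack + one push per neighbour edge)
def pvFuel (graph : List (String × List String)) (stack0 : List String) : Nat :=
  stack0.length + graph.foldl (fun a p => a + p.2.length) 0 + graph.length + 1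

-- ===== PORT A =====
-- _unique_preserve_order: seen set + out list, one pass
def pvUniqueA (seq : List String) : List String :=
  (seq.foldl (fun (st : PySem.Set String × List String) x =>
      if x ∈ st.1 then st else (PySem.Set.add st.1 x, st.2 ++ [x]))
    (PySem.Set.empty, [])).2

-- the while-loop of _traverse (fuel makes the recursion total; one pop per step)
def pvTravA (graph : List (String × List String)) : Nat → List String → List String → List String
  | 0, visited, _ => visited
  | _ + 1, visited, [] => visited
  | f + 1, visited, node :: rest =>
    if node ∈ visited then
      pvTravA graph f visited rest
    else
      let visited' := visited ++ [node]
      let stack' := (pvGet graph node).foldl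
        (fun st n => if n ∉ visited' ∧ n ∉ st then st ++ [n] else st) rest
      pvTravA graph f visited' stack'

def marked_vec_py (target : String) (graph : List (String × List String)) (transitive : Bool) : List String :=
  let imm := pvGet graph target
  let immUnique := pvUniqueA imm
  if !transitive then immUnique
  else
    let full := pvTravA graph (pvFuel graph imm) [] imm
    let transOnly := full.filter (fun x => decide (x ∉ immUnique))
    immUnique ++ transOnly.map (fun t => t ++ "*")

-- ===== PORT B =====
-- the while-loop of B: queue suffix (Python reads queue[i] and appends; the unread suffix is this list),
-- visited_set and seen are Python sets
def pvTravB (graph : List (String × List String)) :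
    Nat → List String → PySem.Set String → PySem.Set String → List String → List String
  | 0, visited, _, _, _ => visited
  | _ + 1, visited, _, _, [] => visited
  | f + 1, visited, visSet, seen, node :: queue =>
    if node ∈ visSet then
      pvTravB graph f visited visSet seen queue
    else
      let visSet' := PySem.Set.add visSet node
      let visited' := visited ++ [node]
      let p := (pvGet graph node).foldl
        (fun (sq : PySem.Set String × List String) n =>
          if n ∈ sq.1 then sq else (PySem.Set.add sq.1 n, sq.2 ++ [n]))
        (seen, queue)
      pvTravB graph f visited' visSet' p.1 p.2

def marked_vec_py_alt (target : String) (graph : List (String × List String)) (transitive : Bool) : List String :=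
  let imm := pvGet graph target
  let immUnique := PySem.List.dedup imm          -- list(dict.fromkeys(imm))
  if !transitive then immUnique
  else
    let visited := pvTravB graph (pvFuel graph imm) [] PySem.Set.empty (PySem.Set.ofList imm) imm
    let immSet := PySem.Set.ofList immUnique
    visited.foldl (fun out x => if x ∈ immSet then out else out ++ [x ++ "*"]) immUnique

-- ===== PRECONDITION & SPEC =====
def Spec_marked_vec_py (target : String) (graph : List (String × List String)) (transitive : Bool) (out : List String) : Prop := out = marked_vec_py_alt target graph transitive
instance (target : String) (graph : List (String × List String)) (transitive : Bool) (out : List String) : Decidable (Spec_marked_vec_py target graph transitive out) := by unfold Spec_marked_vec_py; infer_instance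

-- ===== CLAIM (what is proved, stated in full; the proofs are below) =====
def Claim_equal_marked_vec_py : Prop := ∀ (target : String) (graph : List (String × List String)) (transitive : Bool), Dom_marked_vec_py target graph transitive → Spec_marked_vec_py target graph transitive (marked_vec_py target graph transitive)

-- ===== LEMMAS AND PROOFS =====

-- A's dedup helper keeps its seen-set equal to its out-list, so it computes dict.fromkeys
lemma pvUniqueA_diag (seq : List String) :
    ∀ s : List String,
      (seq.foldl (fun (st : PySem.Set String × List String) x =>
        if x ∈ st.1 then st else (PySem.Set.add st.1 x, st.2 ++ [x])) (s, s))
      = (seq.foldl PySem.Set.add s, seq.foldl PySem.Set.add s) := by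
  induction seq with
  | nil => intro s; rfl
  | cons x xs ih =>
    intro s
    simp only [List.foldl_cons]
    by_cases hx : x ∈ s
    · have ha : PySem.Set.add s x = s := by simp [PySem.Set.add, hx]
      rw [if_pos hx, ha]
      exact ih s
    · have ha : PySem.Set.add s x = s ++ [x] := by simp [PySem.Set.add, hx]
      rw [if_neg hx, ha]
      exact ih (s ++ [x])

lemma pvUniqueA_eq_dedup (seq : List String) : pvUniqueA seq = PySem.List.dedup seq := by
  unfold pvUniqueA
  rw [show (PySem.Set.empty : PySem.Set String) = ([] : List String) from rfl,
      pvUniqueA_diag]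
  rw [PySem.List.dedup_eq_ofList, PySem.Set.ofList_eq_foldl]

-- inner neighbour loop: A's growing-stack membership test equals B's 'seen' test
lemma pvInner_eq (visited' : List String) (nb : List String) :
    ∀ (seen : PySem.Set String) (st : List String),
      (∀ x, x ∈ seen ↔ x ∈ visited' ∨ x ∈ st) →
      (nb.foldl (fun (sq : PySem.Set String × List String) n =>
          if n ∈ sq.1 then sq else (PySem.Set.add sq.1 n, sq.2 ++ [n])) (seen, st)).2
        = nb.foldl (fun st n => if n ∉ visited' ∧ n ∉ st then st ++ [n] else st) st
      ∧ ∀ x, x ∈ (nb.foldl (fun (sq : PySem.Set String × List String) n =>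
          if n ∈ sq.1 then sq else (PySem.Set.add sq.1 n, sq.2 ++ [n])) (seen, st)).1
          ↔ x ∈ visited' ∨ x ∈ nb.foldl (fun st n => if n ∉ visited' ∧ n ∉ st then st ++ [n] else st) st := by
  induction nb with
  | nil => intro seen st H; exact ⟨rfl, H⟩
  | cons n nb ih =>
    intro seen st H
    simp only [List.foldl_cons]
    by_cases hn : n ∈ seen
    · have hA : ¬ (n ∉ visited' ∧ n ∉ st) := by
        have := (H n).mp hn; tauto
      rw [if_pos hn, if_neg hA]
      exact ih seen st H
    · have hA : n ∉ visited' ∧ n ∉ st := by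
        constructor <;> intro h <;> exact hn ((H n).mpr (by tauto))
      rw [if_neg hn, if_pos hA]
      refine ih _ _ ?_
      intro x
      rw [PySem.Set.mem_add, H x]
      simp [List.mem_append]
      tauto

lemma pvTrav_eq (graph : List (String × List String)) (f : Nat) :
    ∀ (visited : List String) (visSet seen : PySem.Set String) (stack : List String),
      (∀ x, x ∈ visSet ↔ x ∈ visited) →
      (∀ x, x ∈ seen ↔ x ∈ visited ∨ x ∈ stack) →
      pvTravB graph f visited visSet seen stack = pvTravA graph f visited stack := by
  induction f with
  | zero => intro visited visSet seen stack _ _; rfl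
  | succ f ih =>
    intro visited visSet seen stack H1 H2
    cases stack with
    | nil => rfl
    | cons node rest =>
      simp only [pvTravA, pvTravB]
      by_cases hv : node ∈ visited
      · rw [if_pos ((H1 node).mpr hv), if_pos hv]
        refine ih visited visSet seen rest H1 ?_
        intro x
        rw [H2 x]
        constructor
        · rintro (h | h)
          · exact Or.inl h
          · rcases List.mem_cons.mp h with h | h
            · exact Or.inl (h ▸ hv)
            · exact Or.inr h
        · rintro (h | h)
          · exact Or.inl h
          · exact Or.inr (List.mem_cons_of_mem _ h)
      · rw [if_neg (fun h => hv ((H1 node).mp h)), if_neg hv]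
        have Hseen : ∀ x, x ∈ seen ↔ x ∈ visited ++ [node] ∨ x ∈ rest := by
          intro x
          rw [H2 x]
          simp [List.mem_append, List.mem_cons]
          tauto
        obtain ⟨hq, hs⟩ := pvInner_eq (visited ++ [node]) (pvGet graph node) seen rest Hseen
        rw [hq]
        refine ih _ _ _ _ ?_ hs
        intro x
        rw [PySem.Set.mem_add, H1 x]
        simp [List.mem_append]


-- ===== VERDICT (by name: the statement is the Claim_ definition above) =====
theorem marked_vec_py_spec : Claim_equal_marked_vec_py := by
  intro target graph transitive _
  unfold Spec_marked_vec_py marked_vec_py marked_vec_py_alt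
  cases transitive with
  | false => simpa using pvUniqueA_eq_dedup (pvGet graph target)
  | true =>
    have htrav : pvTravB graph (pvFuel graph (pvGet graph target)) [] PySem.Set.empty
        (PySem.Set.ofList (pvGet graph target)) (pvGet graph target)
        = pvTravA graph (pvFuel graph (pvGet graph target)) [] (pvGet graph target) := by
      refine pvTrav_eq graph _ [] PySem.Set.empty _ (pvGet graph target) (by simp [PySem.Set.empty]) ?_
      intro x
      rw [PySem.Set.mem_ofList]
      simp
    have hflip : ∀ (out : List String) (x : String),
        (if x ∈ PySem.Set.ofList (PySem.List.dedup (pvGet graph target)) then out else out ++ [x ++ "*"])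
          = (if decide (x ∉ PySem.List.dedup (pvGet graph target)) = true then out ++ [x ++ "*"] else out) := by
      intro out x
      by_cases hx : x ∈ PySem.List.dedup (pvGet graph target) <;>
        simp [hx, PySem.Set.mem_ofList]
    simp only [pvUniqueA_eq_dedup, htrav, Bool.not_true, Bool.false_eq_true, if_false,
      PySem.List.foldl_congr_mem _ _ _ _ (fun acc x _ => hflip acc x),
      PySem.List.foldl_append_if]
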